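-- pv_equiv track=rewrite | github.com/SpreadSheets600/IITM-Python | Sollutions/WEEK 9/w9-GRPA-05.py | ancestry
-- ===== SOURCE A (Python) =====
-- def ancestry(P, present, past):
--     """
--     A recursive function to compute the sequence of ancestors of a person
--
--     Arguments:
--         P: dict, key and value are strings where key is a person and value is their parent
--         present: string, the current person whose ancestors are to be found
--         past: string, the ancestor we are looking for in the ancestry chain
--
--     Return:
--         result: list of strings, the sequence of ancestors from 'present' to 'past'
--     """
--     # Base case: if the current person is the past person, return a list with only 'past'
--     if present == past:
--         return [present]
--
--     # If the present person has no ancestor, return an empty list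
--     if present not in P:
--         return []
--
--     # Recursive case: find the ancestors
--     ancestors = []
--     parent = P[present]
--
--     # Recursive call to find ancestors of the parent
--     ancestor_path = ancestry(P, parent, past)
--
--     # If the path is not empty, prepend the current person to the path
--     if ancestor_path:
--         ancestors = [present] + ancestor_path
--
--     return ancestors
-- ===== SOURCE B (Python) =====
-- def ancestry(P, present, past):
--     # Walk the whole parent chain once (cycle-safe via a visited set),
--     # then cut the chain at the first occurrence of `past`.
--     chain = []
--     seen = set()
--     cur = present
--     while cur not in seen:
--         seen.add(cur)
--         chain.append(cur)
--         if cur not in P: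
--             break
--         cur = P[cur]
--     if past in chain:
--         return chain[:chain.index(past) + 1]
--     return []
-- ===== Notes on version B (the rewrite author's own statement) =====
-- stated objective: alternative
-- what changed: Replaced the recursive descent that prepends the current person to each returned sub-list with two staged passes: one cycle-safe walk that records the whole parent chain in a visited set, then a cut of that chain at the first occurrence of `past`.
import Mathlib
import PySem

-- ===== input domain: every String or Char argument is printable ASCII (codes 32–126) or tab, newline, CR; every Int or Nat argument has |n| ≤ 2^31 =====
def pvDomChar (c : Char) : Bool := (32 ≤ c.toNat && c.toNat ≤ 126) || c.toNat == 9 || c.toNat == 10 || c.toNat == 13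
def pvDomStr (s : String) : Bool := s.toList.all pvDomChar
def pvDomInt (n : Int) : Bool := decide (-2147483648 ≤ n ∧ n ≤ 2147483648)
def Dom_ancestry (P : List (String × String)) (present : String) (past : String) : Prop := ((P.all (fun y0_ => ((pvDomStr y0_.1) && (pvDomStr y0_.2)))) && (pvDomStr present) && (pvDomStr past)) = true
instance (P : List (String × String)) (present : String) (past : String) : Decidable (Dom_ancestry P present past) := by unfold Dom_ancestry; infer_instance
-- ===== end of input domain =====

-- B replaces A's recursion-with-concatenation by a cycle-safe full chain walk followed by a cut at the first occurrence of `past` (alternative decomposition; same measured cost).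


-- ===== PORT A =====
-- dict[present] under the convention: first-match lookup in the association list
def ancestryLookup (P : List (String × String)) (k : String) : Option String :=
  (P.find? (fun p => p.1 == k)).map (·.2)

-- A's recursion is not structurally decreasing; the fuel argument (P.length + 1) only
-- makes it total — Pre_ancestry below guarantees the walk stops within that many steps.
def ancestryGoA (P : List (String × String)) (past : String) : Nat → String → List String
  | 0, _ => []
  | n + 1, present =>
    if present = past then [present]
    else
      match ancestryLookup P present with
      | none => []
      | some parent =>
        let ancestorPath := ancestryGoA P past n parent
        if ancestorPath = [] then [] else present :: ancestorPath

def ancestry (P : List (String × String)) (present : String) (past : String) : List String :=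
  ancestryGoA P past (P.length + 1) present

-- ===== PORT B =====
-- The while loop of Source B: append cur to the chain, stop on a revisit (visited set) or a
-- missing key, else follow the parent.  The fuel P.length + 2 only makes it total: each
-- continuing iteration adds a distinct key of P to `seen`, so it is never exhausted.
def ancestryGoB (P : List (String × String)) : Nat → String → List String → PySem.Set String → List String
  | 0, _, chain, _ => chain
  | n + 1, cur, chain, seen =>
    if seen.contains cur then chain
    else
      let seen := seen.add cur
      let chain := chain ++ [cur]
      match (P.find? (fun q => q.1 == cur)).map (·.2) with
      | none => chain
      | some p => ancestryGoB P n p chain seen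

def ancestry_alt (P : List (String × String)) (present : String) (past : String) : List String :=
  let chain := ancestryGoB P (P.length + 2) present [] PySem.Set.empty
  match PySem.List.index? chain past with
  | some i => chain.take (i + 1)   -- chain[:i+1] with i ≥ 0 is List.take (i+1)
  | none => []

-- ===== PRECONDITION & SPEC =====
-- Pre_ excludes the inputs on which Python A raises RecursionError: parent chains from
-- `present` that cycle without reaching `past` or a missing key (B returns [] there, see Raises_).
def ancestryStep (P : List (String × String)) (x : String) : String :=
  (ancestryLookup P x).getD x

def Pre_ancestry (P : List (String × String)) (present : String) (past : String) : Prop :=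
  ∃ n < P.length + 1,
    (ancestryStep P)^[n] present = past ∨ ancestryLookup P ((ancestryStep P)^[n] present) = none
instance (P : List (String × String)) (present : String) (past : String) : Decidable (Pre_ancestry P present past) := by unfold Pre_ancestry; infer_instance

def pvWitness_ancestry : (List (String × String)) × String × String :=
  ([("a", "b"), ("b", "c")], "a", "c")

def Spec_ancestry (P : List (String × String)) (present : String) (past : String) (out : List String) : Prop := out = ancestry_alt P present past
instance (P : List (String × String)) (present : String) (past : String) (out : List String) : Decidable (Spec_ancestry P present past out) := by unfold Spec_ancestry; infer_instance

-- ===== CLAIM (what is proved, stated in full; the proofs are below) =====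
def Claim_equal_ancestry : Prop := ∀ (P : List (String × String)) (present : String) (past : String), Dom_ancestry P present past → Pre_ancestry P present past → Spec_ancestry P present past (ancestry P present past)

-- ===== LEMMAS AND PROOFS =====

-- path k present = [present, step present, …, step^[k] present]
def ancestryPath (P : List (String × String)) (k : Nat) (present : String) : List String :=
  (List.range (k + 1)).map (fun i => (ancestryStep P)^[i] present)

theorem ancestryPath_succ (P : List (String × String)) (k : Nat) (present : String) :
    ancestryPath P (k + 1) present = present :: ancestryPath P k (ancestryStep P present) := by
  unfold ancestryPath
  rw [List.range_succ_eq_map, List.map_cons, List.map_map]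
  simp only [Function.iterate_zero, id_eq, Function.comp_def, Function.iterate_succ_apply]

-- A's recursion, characterised at the first stop of the parent walk.
theorem ancestryGoA_eq (P : List (String × String)) (past : String) :
    ∀ (k n : Nat) (present : String), k < n →
      ((ancestryStep P)^[k] present = past ∨ ancestryLookup P ((ancestryStep P)^[k] present) = none) →
      (∀ i < k, (ancestryStep P)^[i] present ≠ past ∧ ancestryLookup P ((ancestryStep P)^[i] present) ≠ none) →
      ancestryGoA P past n present =
        if (ancestryStep P)^[k] present = past then ancestryPath P k present else [] := by
  intro k
  induction k with
  | zero =>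
    intro n present hn hstop _
    obtain ⟨m, rfl⟩ : ∃ m, n = m + 1 := ⟨n - 1, by omega⟩
    simp only [Function.iterate_zero, id_eq] at hstop ⊢
    by_cases hp : present = past
    · simp [ancestryGoA, hp, ancestryPath, List.range_one]
    · rcases hstop with h | h
      · exact absurd h hp
      · simp [ancestryGoA, hp, h]
  | succ k ih =>
    intro n present hn hstop hmin
    obtain ⟨m, rfl⟩ : ∃ m, n = m + 1 := ⟨n - 1, by omega⟩
    have h0 := hmin 0 (Nat.succ_pos k)
    simp only [Function.iterate_zero, id_eq] at h0
    obtain ⟨hp, hl⟩ := h0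
    obtain ⟨par, hpar⟩ : ∃ p, ancestryLookup P present = some p :=
      Option.ne_none_iff_exists'.mp hl
    have hstepeq : ancestryStep P present = par := by
      simp [ancestryStep, hpar]
    have hshift : ∀ i, (ancestryStep P)^[i] par = (ancestryStep P)^[i + 1] present := by
      intro i; rw [Function.iterate_succ_apply, hstepeq]
    have := ih m par (by omega)
      (by rw [hshift]; exact hstop)
      (by intro i hi; rw [hshift]; exact hmin (i + 1) (by omega))
    simp only [ancestryGoA, if_neg hp, hpar]
    rw [this, ← hshift k]
    have hlen : (ancestryPath P k par).length = k + 1 := by simp [ancestryPath]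
    have hne : ancestryPath P k par ≠ [] := by
      intro h; rw [h] at hlen; simp at hlen
    by_cases hk : (ancestryStep P)^[k] par = past
    · rw [if_pos hk, if_neg hne, if_pos hk, ancestryPath_succ, hstepeq]
    · rw [if_neg hk, if_pos rfl, if_neg hk]

-- B's loop always extends its chain accumulator.
theorem ancestryGoB_extends (P : List (String × String)) :
    ∀ (n : Nat) (cur : String) (chain : List String) (seen : PySem.Set String),
      ∃ r, ancestryGoB P n cur chain seen = chain ++ r := by
  intro n
  induction n with
  | zero => intro cur chain seen; exact ⟨[], by simp [ancestryGoB]⟩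
  | succ n ih =>
    intro cur chain seen
    by_cases hs : seen.contains cur
    · exact ⟨[], by simp only [ancestryGoB]; rw [if_pos hs]; simp⟩
    · simp only [ancestryGoB]
      rw [if_neg (show ¬ (seen.contains cur = true) from hs)]
      cases hget : (P.find? (fun q => q.1 == cur)).map (·.2) with
      | none => exact ⟨[cur], by simp⟩
      | some p =>
        obtain ⟨r, hr⟩ := ih p (chain ++ [cur]) (seen.add cur)
        exact ⟨[cur] ++ r, by simp [hr]⟩

-- B's loop, up to the first stop of the parent walk: it lays down exactly the walk,
-- and stops there when the stop is a missing key.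
theorem ancestryGoB_eq (P : List (String × String)) :
    ∀ (k n : Nat) (present : String) (chain : List String) (seen : PySem.Set String), k < n →
      ((∃ p, ancestryLookup P ((ancestryStep P)^[k] present) = some p) ∨
        ancestryLookup P ((ancestryStep P)^[k] present) = none) →
      (∀ i < k, ancestryLookup P ((ancestryStep P)^[i] present) ≠ none) →
      (∀ i j, i < j → j ≤ k → (ancestryStep P)^[i] present ≠ (ancestryStep P)^[j] present) →
      (∀ i ≤ k, ¬ ((ancestryStep P)^[i] present) ∈ seen) →
      ∃ r, ancestryGoB P n present chain seen = chain ++ ancestryPath P k present ++ r ∧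
        (ancestryLookup P ((ancestryStep P)^[k] present) = none → r = []) := by
  intro k
  induction k with
  | zero =>
    intro n present chain seen hn hstop _ _ hseen
    obtain ⟨m, rfl⟩ : ∃ m, n = m + 1 := ⟨n - 1, by omega⟩
    have h0 : ¬ present ∈ seen := by
      have := hseen 0 (Nat.le_refl 0); simpa using this
    simp only [Function.iterate_zero, id_eq] at hstop
    simp only [ancestryGoB]
    rw [if_neg (show ¬ (seen.contains present = true) from fun hcon => h0 (List.mem_of_elem_eq_true hcon))]
    cases hget : (P.find? (fun q => q.1 == present)).map (·.2) with
    | none =>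
      refine ⟨[], ?_, fun _ => rfl⟩
      simp [ancestryPath, List.range_one]
    | some p =>
      obtain ⟨r, hr⟩ := ancestryGoB_extends P m p (chain ++ [present]) (seen.add present)
      refine ⟨r, ?_, ?_⟩
      · simp [hr, ancestryPath, List.range_one]
      · intro hnone
        exact absurd hnone (by simp [ancestryLookup, hget])
  | succ k ih =>
    intro n present chain seen hn hstop hmin hdist hseen
    obtain ⟨m, rfl⟩ : ∃ m, n = m + 1 := ⟨n - 1, by omega⟩
    have h0 : ¬ present ∈ seen := by
      have := hseen 0 (Nat.zero_le _); simpa using this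
    have hl0 : ancestryLookup P present ≠ none := by
      have := hmin 0 (Nat.succ_pos k); simpa using this
    obtain ⟨par, hpar⟩ : ∃ p, ancestryLookup P present = some p :=
      Option.ne_none_iff_exists'.mp hl0
    have hstepeq : ancestryStep P present = par := by simp [ancestryStep, hpar]
    have hshift : ∀ i, (ancestryStep P)^[i] par = (ancestryStep P)^[i + 1] present := by
      intro i; rw [Function.iterate_succ_apply, hstepeq]
    have hget : (P.find? (fun q => q.1 == present)).map (·.2) = some par := hpar
    simp only [ancestryGoB]
    rw [if_neg (show ¬ (seen.contains present = true) from fun hcon => h0 (List.mem_of_elem_eq_true hcon)), hget]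
    obtain ⟨r, hr, hr0⟩ := ih m par (chain ++ [present]) (seen.add present) (by omega)
      (by rw [hshift]; exact hstop)
      (by intro i hi; rw [hshift]; exact hmin (i + 1) (by omega))
      (by intro i j hij hjk; rw [hshift, hshift]; exact hdist (i + 1) (j + 1) (by omega) (by omega))
      (by
        intro i hik
        rw [hshift, PySem.Set.mem_add]
        rintro (h | h)
        · exact hseen (i + 1) (by omega) h
        · exact hdist 0 (i + 1) (Nat.succ_pos i) (by omega)
            (by simp only [Function.iterate_zero, id_eq]; exact h.symm))
    refine ⟨r, ?_, ?_⟩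
    · show ancestryGoB P m par (chain ++ [present]) (seen.add present) = _
      rw [hr, ancestryPath_succ, hstepeq]; simp
    · intro hnone; exact hr0 (by rw [hshift]; exact hnone)

theorem ancestry_spec : Claim_equal_ancestry := by
  intro P present past _ hpre
  unfold Spec_ancestry ancestry ancestry_alt
  obtain ⟨n0, hn0, hstop0⟩ := hpre
  have hex : ∃ k, ((ancestryStep P)^[k] present = past ∨
      ancestryLookup P ((ancestryStep P)^[k] present) = none) := ⟨n0, hstop0⟩
  have hkstop := Nat.find_spec hex
  have hkmin : ∀ i < Nat.find hex, ¬ ((ancestryStep P)^[i] present = past ∨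
      ancestryLookup P ((ancestryStep P)^[i] present) = none) := fun i hi => Nat.find_min hex hi
  have hkle : Nat.find hex ≤ n0 := Nat.find_min' hex hstop0
  set k := Nat.find hex with hkdef
  have hminP : ∀ i < k, (ancestryStep P)^[i] present ≠ past ∧
      ancestryLookup P ((ancestryStep P)^[i] present) ≠ none := by
    intro i hi
    exact ⟨fun h => hkmin i hi (Or.inl h), fun h => hkmin i hi (Or.inr h)⟩
  have hdist : ∀ i j, i < j → j ≤ k →
      (ancestryStep P)^[i] present ≠ (ancestryStep P)^[j] present := by
    intro i j hij hjk heq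
    have h1 : (ancestryStep P)^[k] present = (ancestryStep P)^[k - j + i] present := by
      have h2 : (ancestryStep P)^[k] present =
          (ancestryStep P)^[k - j] ((ancestryStep P)^[j] present) := by
        rw [← Function.iterate_add_apply]; congr 1; omega
      rw [h2, ← heq, ← Function.iterate_add_apply]
    exact hkmin (k - j + i) (by omega) (by rw [← h1]; exact hkstop)
  have hA := ancestryGoA_eq P past k (P.length + 1) present (by omega) hkstop hminP
  obtain ⟨r, hB, hr0⟩ := ancestryGoB_eq P k (P.length + 2) present [] PySem.Set.empty
    (by omega)
    (by
      rcases hget : ancestryLookup P ((ancestryStep P)^[k] present) with _ | p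
      · exact Or.inr rfl
      · exact Or.inl ⟨p, rfl⟩)
    (fun i hi => (hminP i hi).2)
    hdist
    (by intro i _; exact List.not_mem_nil)
  rw [hA, hB]
  simp only [List.nil_append]
  by_cases hpast : (ancestryStep P)^[k] present = past
  · rw [if_pos hpast]
    have hsplit : ancestryPath P k present =
        (List.range k).map (fun i => (ancestryStep P)^[i] present) ++ [past] := by
      unfold ancestryPath
      rw [List.range_succ, List.map_append]
      simp [hpast]
    have hnotmem : past ∉ (List.range k).map (fun i => (ancestryStep P)^[i] present) := by
      simp only [List.mem_map, List.mem_range]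
      rintro ⟨i, hi, hieq⟩
      exact (hminP i hi).1 hieq
    have hidx : PySem.List.index? (ancestryPath P k present ++ r) past = some k := by
      rw [PySem.List.index?_append_of_mem r (by rw [hsplit]; simp), hsplit,
        PySem.List.index?_append_singleton_self _ past hnotmem]
      simp
    rw [hidx]
    have hlen : (ancestryPath P k present).length = k + 1 := by simp [ancestryPath]
    show ancestryPath P k present = (ancestryPath P k present ++ r).take (k + 1)
    rw [List.take_left' hlen]
  · rw [if_neg hpast]
    have hnone : ancestryLookup P ((ancestryStep P)^[k] present) = none := by
      rcases hkstop with h | h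
      · exact absurd h hpast
      · exact h
    rw [hr0 hnone, List.append_nil]
    have hnm : past ∉ ancestryPath P k present := by
      unfold ancestryPath
      simp only [List.mem_map, List.mem_range]
      rintro ⟨i, hi, hieq⟩
      rcases Nat.lt_or_ge i k with hik | hik
      · exact (hminP i hik).1 hieq
      · have : i = k := by omega
        exact hpast (this ▸ hieq)
    rw [(PySem.List.index?_eq_none_iff _ _).mpr hnm]
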